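-- pv_equiv track=rewrite | github.com/c1rca/tonies-yt | scripts/dev/regression_smoke.py | pick_short_candidate_index
-- ===== SOURCE A (Python) =====
-- def pick_short_candidate_index(job: dict, min_seconds: int = 90, max_seconds: int = 210) -> int:
--     cands = job.get("candidates") or []
--     best = -1
--     for i, c in enumerate(cands):
--         try:
--             d = int(c.get("duration") or 0)
--         except Exception:
--             d = 0
--         if min_seconds <= d <= max_seconds:
--             return i
--         if best < 0 and d > 0 and d <= max_seconds + 60:
--             best = i
--     return best if best >= 0 else 0
-- ===== SOURCE B (Python) =====
-- def pick_short_candidate_index(job: dict, min_seconds: int = 90, max_seconds: int = 210) -> int: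
--     cands = job.get("candidates") or []
--     durations = []
--     for c in cands:
--         try:
--             d = int(c.get("duration") or 0)
--         except Exception:
--             d = 0
--         durations.append(d)
--     for i, d in enumerate(durations):
--         if min_seconds <= d <= max_seconds:
--             return i
--     for i, d in enumerate(durations):
--         if 0 < d <= max_seconds + 60:
--             return i
--     return 0
-- ===== Notes on version B (the rewrite author's own statement) =====
-- stated objective: alternative
-- what changed: B replaces A's single stateful loop (early return plus a 'best' fallback accumulator) with a parse-once pass followed by two independent first-match searches (in-range first, then fallback range), relying on the fact that any in-range match takes priority over every fallback match.
import Mathlib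
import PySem

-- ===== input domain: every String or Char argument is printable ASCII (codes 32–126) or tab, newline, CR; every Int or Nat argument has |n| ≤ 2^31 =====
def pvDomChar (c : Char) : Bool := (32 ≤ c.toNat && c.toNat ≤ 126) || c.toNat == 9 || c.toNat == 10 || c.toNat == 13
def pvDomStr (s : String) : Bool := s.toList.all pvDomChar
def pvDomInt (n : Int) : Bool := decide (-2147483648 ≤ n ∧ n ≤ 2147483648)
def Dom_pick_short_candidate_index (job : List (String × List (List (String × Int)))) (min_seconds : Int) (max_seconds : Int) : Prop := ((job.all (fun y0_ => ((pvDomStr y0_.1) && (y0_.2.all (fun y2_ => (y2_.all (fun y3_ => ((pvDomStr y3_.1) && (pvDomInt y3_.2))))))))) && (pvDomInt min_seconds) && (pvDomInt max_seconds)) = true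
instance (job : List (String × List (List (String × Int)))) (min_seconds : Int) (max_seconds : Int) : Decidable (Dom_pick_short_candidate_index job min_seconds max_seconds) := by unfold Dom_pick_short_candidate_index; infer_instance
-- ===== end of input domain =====

-- B replaces A's single stateful loop (early return + fallback accumulator) with a parse-once
-- duration pass followed by two independent first-match searches; same cost, different decomposition.


-- ===== PORT A =====
-- A's loop: early return on the first in-range duration, tracking the first fallback index in `best`.
-- (int(c.get("duration") or 0) is the identity on the Int-valued durations here; the try/except never fires.)
def pickA_loop (cands : List (List (String × Int))) (i : Int) (best : Int) (min_seconds max_seconds : Int) : Int :=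
  match cands with
  | [] => if best ≥ 0 then best else 0
  | c :: rest =>
    let d := ((PySem.Dict.mk c).get? "duration").getD 0
    if min_seconds ≤ d ∧ d ≤ max_seconds then i
    else pickA_loop rest (i + 1) (if best < 0 ∧ d > 0 ∧ d ≤ max_seconds + 60 then i else best) min_seconds max_seconds

def pick_short_candidate_index (job : List (String × List (List (String × Int)))) (min_seconds : Int) (max_seconds : Int) : Int :=
  let cands := ((PySem.Dict.mk job).get? "candidates").getD []
  pickA_loop cands 0 (-1) min_seconds max_seconds

-- ===== PORT B =====
-- B: parse all durations once, then two independent first-match searches.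
def pick_short_candidate_index_alt (job : List (String × List (List (String × Int)))) (min_seconds : Int) (max_seconds : Int) : Int :=
  let cands := ((PySem.Dict.mk job).get? "candidates").getD []
  let ds := cands.map (fun c => ((PySem.Dict.mk c).get? "duration").getD 0)
  match ds.findIdx? (fun d => decide (min_seconds ≤ d ∧ d ≤ max_seconds)) with
  | some i => (i : Int)
  | none =>
    match ds.findIdx? (fun d => decide (0 < d ∧ d ≤ max_seconds + 60)) with
    | some i => (i : Int)
    | none => 0

-- ===== PRECONDITION & SPEC =====
def Spec_pick_short_candidate_index (job : List (String × List (List (String × Int)))) (min_seconds : Int) (max_seconds : Int) (out : Int) : Prop := out = pick_short_candidate_index_alt job min_seconds max_seconds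
instance (job : List (String × List (List (String × Int)))) (min_seconds : Int) (max_seconds : Int) (out : Int) : Decidable (Spec_pick_short_candidate_index job min_seconds max_seconds out) := by unfold Spec_pick_short_candidate_index; infer_instance

-- ===== CLAIM (what is proved, stated in full; the proofs are below) =====
def Claim_equal_pick_short_candidate_index : Prop := ∀ (job : List (String × List (List (String × Int)))) (min_seconds : Int) (max_seconds : Int), Dom_pick_short_candidate_index job min_seconds max_seconds → Spec_pick_short_candidate_index job min_seconds max_seconds (pick_short_candidate_index job min_seconds max_seconds)

-- ===== LEMMAS AND PROOFS =====

-- Helper used only by the proofs: A's loop over the pre-extracted duration list.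
def pickAux (ds : List Int) (i best min_seconds max_seconds : Int) : Int :=
  match ds with
  | [] => if best ≥ 0 then best else 0
  | d :: rest =>
    if min_seconds ≤ d ∧ d ≤ max_seconds then i
    else pickAux rest (i + 1) (if best < 0 ∧ d > 0 ∧ d ≤ max_seconds + 60 then i else best) min_seconds max_seconds

theorem pickA_loop_eq_pickAux (cands : List (List (String × Int))) (i best mn mx : Int) :
    pickA_loop cands i best mn mx =
      pickAux (cands.map (fun c => ((PySem.Dict.mk c).get? "duration").getD 0)) i best mn mx := by
  induction cands generalizing i best with
  | nil => rfl
  | cons c rest ih => simp only [pickA_loop, pickAux, List.map_cons]; rw [ih]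

-- Invariant of A's loop: the first in-range index wins; otherwise the entering `best`
-- if set; otherwise the first fallback index; otherwise 0.
theorem pickAux_eq (ds : List Int) (i best mn mx : Int) (hi : 0 ≤ i) :
    pickAux ds i best mn mx =
      match ds.findIdx? (fun d => decide (mn ≤ d ∧ d ≤ mx)) with
      | some j => i + (j : Int)
      | none =>
        if best ≥ 0 then best
        else
          match ds.findIdx? (fun d => decide (0 < d ∧ d ≤ mx + 60)) with
          | some j => i + (j : Int)
          | none => 0 := by
  induction ds generalizing i best with
  | nil => rfl
  | cons d rest ih =>
    by_cases h1 : mn ≤ d ∧ d ≤ mx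
    · have e1 : (decide (mn ≤ d ∧ d ≤ mx)) = true := by simpa using h1
      simp only [pickAux, if_pos h1, List.findIdx?_cons, if_pos e1]
      simp
    · have e1 : ¬ ((decide (mn ≤ d ∧ d ≤ mx)) = true) := by simpa using h1
      simp only [pickAux, if_neg h1, List.findIdx?_cons, if_neg e1]
      rw [ih _ _ (by omega)]
      cases hfa : rest.findIdx? (fun d => decide (mn ≤ d ∧ d ≤ mx)) with
      | some j => simp only [Option.map_some]; push_cast; ring
      | none =>
        simp only [Option.map_none]
        by_cases h2 : best < 0 ∧ d > 0 ∧ d ≤ mx + 60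
        · have e2 : (decide (0 < d ∧ d ≤ mx + 60)) = true := by
            simp only [decide_eq_true_eq]; exact ⟨h2.2.1, h2.2.2⟩
          rw [if_pos h2, if_pos (by omega : (i : Int) ≥ 0), if_neg (by omega : ¬ best ≥ 0),
              if_pos e2]
          simp
        · rw [if_neg h2]
          by_cases hb : best ≥ 0
          · rw [if_pos hb, if_pos hb]
          · rw [if_neg hb, if_neg hb]
            have e2 : ¬ ((decide (0 < d ∧ d ≤ mx + 60)) = true) := by
              simp only [decide_eq_true_eq]; omega
            rw [if_neg e2]
            cases hfb : rest.findIdx? (fun d => decide (0 < d ∧ d ≤ mx + 60)) with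
            | some j => simp only [Option.map_some]; push_cast; ring
            | none => simp only [Option.map_none]

-- ===== VERDICT (by name: the statement is the Claim_ definition above) =====
theorem pick_short_candidate_index_spec : Claim_equal_pick_short_candidate_index := by
  intro job mn mx _
  unfold Spec_pick_short_candidate_index pick_short_candidate_index pick_short_candidate_index_alt
  rw [pickA_loop_eq_pickAux, pickAux_eq _ _ _ _ _ (by omega)]
  cases hfa : (((PySem.Dict.mk job).get? "candidates").getD []).map
      (fun c => ((PySem.Dict.mk c).get? "duration").getD 0) |>.findIdx?
      (fun d => decide (mn ≤ d ∧ d ≤ mx)) with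
  | some j => simp only [hfa]; norm_num
  | none =>
    simp only [hfa, if_neg (by omega : ¬ ((-1 : Int) ≥ 0))]
    cases hfb : (((PySem.Dict.mk job).get? "candidates").getD []).map
        (fun c => ((PySem.Dict.mk c).get? "duration").getD 0) |>.findIdx?
        (fun d => decide (0 < d ∧ d ≤ mx + 60)) with
    | some j => norm_num
    | none => rfl
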